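-- pv_equiv track=rewrite | github.com/Bernullys/curso_cs50_python | lecture2/plates3.py | last_part
-- ===== SOURCE A (Python) =====
-- def last_part(l_part):
--     if len(l_part) >= 3:
--         for c in l_part:
--             if c.isdigit():
--                 numb = l_part.index(c)
--                 if l_part[numb:].isdigit():
--                     return True
--                 else:
--                     return False
--     return True
-- ===== SOURCE B (Python) =====
-- def last_part(l_part):
--     if len(l_part) < 3:
--         return True
--     seen_digit = False
--     for c in l_part:
--         if c.isdigit():
--             seen_digit = True
--         elif seen_digit:
--             return False
--     return True
-- ===== Notes on version B (the rewrite author's own statement) =====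
-- stated objective: simpler
-- what changed: Replaced find-first-digit via .index() plus a slice rescan with a single stateful pass that tracks whether a digit has been seen and fails on the first non-digit after it.
import Mathlib
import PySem

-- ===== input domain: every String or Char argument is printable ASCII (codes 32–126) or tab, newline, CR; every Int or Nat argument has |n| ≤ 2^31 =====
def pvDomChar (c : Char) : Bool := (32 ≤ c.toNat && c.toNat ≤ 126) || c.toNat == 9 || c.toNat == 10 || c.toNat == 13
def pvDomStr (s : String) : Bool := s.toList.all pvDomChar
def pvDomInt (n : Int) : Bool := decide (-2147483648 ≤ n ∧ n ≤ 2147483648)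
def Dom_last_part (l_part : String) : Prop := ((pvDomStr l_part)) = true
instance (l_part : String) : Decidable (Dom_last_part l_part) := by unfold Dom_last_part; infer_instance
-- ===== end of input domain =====

-- B replaces A's .index() lookup and slice rescan with one stateful pass (objective: simpler).

-- ===== PORT A =====
-- the 'for c in l_part' loop: on the first digit c, A looks up l_part.index(c)
-- and tests the suffix slice l_part[numb:].isdigit(); the index lookup always
-- succeeds (c was taken from l_part), the 'none' arm is unreachable.
def lastPartLoopA (full : List Char) : List Char → Bool
  | [] => true
  | c :: rest =>
    if PySem.Chars.isdigit c then
      match PySem.List.index? full c with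
      | some numb => PySem.Chars.strIsdigit (PySem.List.slice full (some (numb : Int)) none)
      | none => true
    else lastPartLoopA full rest

def last_part (l_part : String) : Bool :=
  if PySem.Str.len l_part ≥ 3 then lastPartLoopA l_part.toList l_part.toList
  else true

-- ===== PORT B =====
-- single pass with a seen_digit flag; 'return False' = the false branch
def lastPartLoopB : List Char → Bool → Bool
  | [], _ => true
  | c :: rest, seen_digit =>
    if PySem.Chars.isdigit c then lastPartLoopB rest true
    else if seen_digit then false
    else lastPartLoopB rest seen_digit

def last_part_alt (l_part : String) : Bool :=
  if PySem.Str.len l_part < 3 then true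
  else lastPartLoopB l_part.toList false

-- ===== PRECONDITION & SPEC =====
def Spec_last_part (l_part : String) (out : Bool) : Prop := out = last_part_alt l_part
instance (l_part : String) (out : Bool) : Decidable (Spec_last_part l_part out) := by unfold Spec_last_part; infer_instance

-- ===== CLAIM (what is proved, stated in full; the proofs are below) =====
def Claim_equal_last_part : Prop := ∀ (l_part : String), Dom_last_part l_part → Spec_last_part l_part (last_part l_part)

-- ===== LEMMAS AND PROOFS =====

-- B with seen_digit = true accepts exactly the all-digit suffixes
theorem loopB_true (l : List Char) : lastPartLoopB l true = l.all PySem.Chars.isdigit := by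
  induction l with
  | nil => rfl
  | cons c rest ih =>
    simp only [lastPartLoopB, List.all_cons]
    by_cases h : PySem.Chars.isdigit c = true <;> simp [h, ih]

-- B skips the non-digit prefix, then demands digits
theorem loopB_false (l : List Char) :
    lastPartLoopB l false = (l.dropWhile (fun c => !PySem.Chars.isdigit c)).all PySem.Chars.isdigit := by
  induction l with
  | nil => rfl
  | cons c rest ih =>
    by_cases h : PySem.Chars.isdigit c = true
    · simp [lastPartLoopB, h, loopB_true]
    · simp [lastPartLoopB, h, ih]

-- A's loop, run on any list, reaches the first digit of that list
theorem loopA_eq (full l : List Char) :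
    lastPartLoopA full l =
      match l.dropWhile (fun c => !PySem.Chars.isdigit c) with
      | [] => true
      | c :: _ =>
        match PySem.List.index? full c with
        | some numb => PySem.Chars.strIsdigit (PySem.List.slice full (some (numb : Int)) none)
        | none => true := by
  induction l with
  | nil => rfl
  | cons c rest ih =>
    by_cases h : PySem.Chars.isdigit c = true
    · simp [lastPartLoopA, h]
    · simp [lastPartLoopA, h, ih]

theorem drop_takeWhile_length (p : Char → Bool) :
    ∀ l : List Char, l.drop (l.takeWhile p).length = l.dropWhile p
  | [] => rfl
  | c :: rest => by
    by_cases h : p c = true <;>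
      simp [List.takeWhile_cons, List.dropWhile_cons, h, drop_takeWhile_length p rest]

-- the core: A's index-and-slice computation agrees with B's scan on every list
theorem core (full : List Char) : lastPartLoopA full full = lastPartLoopB full false := by
  rw [loopB_false, loopA_eq]
  rcases hd : full.dropWhile (fun c => !PySem.Chars.isdigit c) with _ | ⟨c, rest⟩
  · simp
  · have hc : PySem.Chars.isdigit c = true := by
      have := List.head_dropWhile_not (p := fun c => !PySem.Chars.isdigit c) (l := full)
        (by simp [hd])
      simpa [hd] using this
    have hsplit : full = full.takeWhile (fun c => !PySem.Chars.isdigit c) ++ c :: rest := by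
      conv_lhs => rw [← List.takeWhile_append_dropWhile
        (p := fun c => !PySem.Chars.isdigit c) (l := full)]
      rw [hd]
    have hnot : c ∉ full.takeWhile (fun c => !PySem.Chars.isdigit c) := by
      intro hmem
      have := List.mem_takeWhile_imp hmem
      simp [hc] at this
    have hidx : PySem.List.index? full c
        = some (full.takeWhile (fun c => !PySem.Chars.isdigit c)).length := by
      rw [PySem.List.index?_eq_some_iff]
      exact ⟨_, rest, hsplit, rfl, hnot⟩
    simp only [hidx, PySem.List.slice_from_natCast]
    have hdrop : full.drop (full.takeWhile (fun c => !PySem.Chars.isdigit c)).length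
        = c :: rest := by
      rw [drop_takeWhile_length, hd]
    rw [hdrop]
    simp [PySem.Chars.strIsdigit, hc]

-- ===== VERDICT (by name: the statement is the Claim_ definition above) =====
theorem last_part_spec : Claim_equal_last_part := by
  intro l_part _
  unfold Spec_last_part last_part last_part_alt
  by_cases h : PySem.Str.len l_part ≥ 3
  · simp only [h, if_pos, if_neg (by omega : ¬ PySem.Str.len l_part < 3)]
    exact core l_part.toList
  · simp only [if_neg h, if_pos (by omega : PySem.Str.len l_part < 3)]
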